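-- pv_equiv track=rewrite | github.com/VegaMario/QuantumSudokuSolver | nxnxn_solver.py | lines_adjust
-- ===== SOURCE A (Python) =====
-- import math
--
-- def lines_adjust(lines):
--     n = int(math.sqrt(len(lines)))
--     layers = []  # store the layers of stacked sudoku puzzles
--
--     for offset in range(n):
--         layer = []  # individual layers will be stored here
--         for row in range(n):
--             layer.append(lines[row + offset * n])  # add the lines that belong to the layer
--         layers.append(layer)  # add the layer to the list of layers
--
--     return layers  # return the layers list
-- ===== SOURCE B (Python) =====
-- import math
--
-- def lines_adjust(lines):
--     n = int(math.sqrt(len(lines)))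
--
--     def chop(xs):
--         # recursively peel the first n lines off as one layer
--         if not xs:
--             return []
--         return [xs[:n]] + chop(xs[n:])
--
--     return chop(lines[:n * n])
-- ===== Notes on version B (the rewrite author's own statement) =====
-- stated objective: simpler
-- what changed: Replaces A's index-arithmetic nested loops (lookups at row + offset*n) with a recursive slicer that peels the first n lines off the n*n prefix at each step; no indices are computed.
import Mathlib
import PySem

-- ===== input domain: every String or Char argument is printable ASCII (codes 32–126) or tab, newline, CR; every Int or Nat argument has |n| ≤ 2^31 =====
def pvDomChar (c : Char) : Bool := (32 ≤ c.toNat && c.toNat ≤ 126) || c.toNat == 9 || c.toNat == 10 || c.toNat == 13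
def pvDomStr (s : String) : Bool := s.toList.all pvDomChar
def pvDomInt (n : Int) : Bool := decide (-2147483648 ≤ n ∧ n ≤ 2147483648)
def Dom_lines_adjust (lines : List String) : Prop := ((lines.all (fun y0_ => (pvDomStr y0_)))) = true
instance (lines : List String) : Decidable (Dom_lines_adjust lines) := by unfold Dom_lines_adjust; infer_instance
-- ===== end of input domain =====

-- B replaces A's index-arithmetic nested loops with a recursive slicer that peels
-- the first n lines off the n*n prefix at each step; a shorter, index-free decomposition.

-- ===== PORT A =====
-- n = int(math.sqrt(len(lines))): Nat.sqrt is the floor square root, exact here.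
-- lines[row + offset*n]: the index is always 0 ≤ idx < n*n ≤ lines.length, so the
-- in-range List.getD is exact (Python never raises here).
def lines_adjust (lines : List String) : List (List String) :=
  let n := lines.length.sqrt
  (List.range n).foldl
    (fun layers offset =>
      layers ++ [(List.range n).foldl
        (fun layer row => layer ++ [lines.getD (row + offset * n) ""]) []])
    []

-- ===== PORT B =====
-- chop(xs): if not xs: return [] ; else [xs[:n]] + chop(xs[n:]).
-- xs[:n] with n ≥ 0 is List.take n; xs[n:] on a nonempty x :: rest is rest.drop (n-1)
-- whenever n ≥ 1 — and every call of chop that reaches a nonempty xs has n ≥ 1,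
-- since with n = 0 the initial argument lines[:0] is already empty — written this
-- way for structural termination.
def chopB (n : Nat) : List String → List (List String)
  | [] => []
  | x :: rest => ((x :: rest).take n) :: chopB n (rest.drop (n - 1))
termination_by xs => xs.length
decreasing_by simp

-- return chop(lines[:n*n])
def lines_adjust_alt (lines : List String) : List (List String) :=
  let n := lines.length.sqrt
  chopB n (lines.take (n * n))

-- ===== PRECONDITION & SPEC =====
def Spec_lines_adjust (lines : List String) (out : List (List String)) : Prop := out = lines_adjust_alt lines
instance (lines : List String) (out : List (List String)) : Decidable (Spec_lines_adjust lines out) := by unfold Spec_lines_adjust; infer_instance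

-- ===== CLAIM (what is proved, stated in full; the proofs are below) =====
def Claim_equal_lines_adjust : Prop := ∀ (lines : List String), Dom_lines_adjust lines → Spec_lines_adjust lines (lines_adjust lines)

-- ===== LEMMAS AND PROOFS =====

-- a foldl that appends one element per item is a map
theorem pv_foldl_app {α β : Type} (f : α → β) :
    ∀ (l : List α) (init : List β),
      l.foldl (fun acc x => acc ++ [f x]) init = init ++ l.map f := by
  intro l
  induction l with
  | nil => simp
  | cons x xs ih => intro init; simp [List.foldl, ih]

-- the recursive slicer on a list of length m*n (n ≥ 1) yields the m chunks
theorem pv_chop (n : ℕ) (hn : 1 ≤ n) :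
    ∀ (m : ℕ) (xs : List String), xs.length = m * n →
      chopB n xs = (List.range m).map (fun o => (xs.drop (o * n)).take n) := by
  intro m
  induction m with
  | zero =>
    intro xs h
    have hxs : xs = [] := List.eq_nil_of_length_eq_zero (by omega)
    rw [hxs, chopB]
    simp
  | succ m ih =>
    intro xs h
    obtain ⟨x, rest, rfl⟩ : ∃ y ys, xs = y :: ys := by
      cases xs with
      | nil => simp at h; omega
      | cons a as => exact ⟨a, as, rfl⟩
    rw [chopB.eq_def]
    simp only []
    have hdrop : rest.drop (n - 1) = (x :: rest).drop n := by
      cases n with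
      | zero => omega
      | succ k => simp
    have hlen2 : (List.drop n (x :: rest)).length = m * n := by
      simp at h ⊢
      have hmn : (m + 1) * n = m * n + n := by ring
      omega
    rw [hdrop, ih _ hlen2]
    rw [List.range_succ_eq_map]
    simp only [List.map_cons, List.map_map, Nat.zero_mul, List.drop_zero]
    congr 1
    apply List.map_congr_left
    intro o _
    simp [List.drop_drop]
    congr 2
    ring

-- ===== VERDICT (by name: the statement is the Claim_ definition above) =====
theorem lines_adjust_spec : Claim_equal_lines_adjust := by
  intro lines _
  show lines_adjust lines = lines_adjust_alt lines
  simp only [lines_adjust, lines_adjust_alt]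
  set n := lines.length.sqrt with hn
  rw [pv_foldl_app]
  by_cases hn0 : n = 0
  · rw [hn0]; simp; rw [chopB]
  · have hn1 : 1 ≤ n := by omega
    have hsq : n * n ≤ lines.length := by
      have h := Nat.sqrt_le' lines.length
      simpa [pow_two, hn] using h
    have hlen : (lines.take (n * n)).length = n * n := by simp [hsq]
    rw [pv_chop n hn1 n _ hlen]
    simp only [List.nil_append]
    apply List.map_congr_left
    intro o ho
    rw [pv_foldl_app]
    simp only [List.nil_append]
    have ho' : o < n := List.mem_range.mp ho
    have hob : o * n + n ≤ n * n := by
      calc o * n + n = (o + 1) * n := by ring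
        _ ≤ n * n := Nat.mul_le_mul_right n (by omega)
    apply List.ext_getElem
    · simp [hlen]
      omega
    · intro i h1 h2
      simp only [List.getElem_map, List.getElem_range, List.getElem_take, List.getElem_drop]
      have hi : i < n := by simpa using h1
      have hidx : i + o * n < lines.length := by omega
      rw [List.getD_eq_getElem _ _ hidx]
      congr 1
      omega
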